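-- pv_equiv track=rewrite | github.com/Countdown369/kimberling-shuffle | playground2.py | volcano
-- ===== SOURCE A (Python) =====
-- def volcano(start, middle, end):
--     volcano_list = [middle]
--     the_range = min(end-middle, middle-start) // 3
--     for i in range(1, the_range + 1):
--         volcano_list.append(middle-(i*3))
--         volcano_list.append(middle+(i*3))
--     for i in range(volcano_list[-1]+3, end+1, 3):
--         volcano_list.append(i)
--     return(volcano_list)
-- ===== SOURCE B (Python) =====
-- def volcano(start, middle, end):
--     # Closed-form: compute the output length, then produce each position j
--     # directly from an index formula (no appending/interleaving of sequences).
--     k = max(0, min(end - middle, middle - start) // 3)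
--     t = max(0, (end - middle - 3 * k) // 3)
--
--     def at_index(j):
--         if j == 0:
--             return middle
--         if j <= 2 * k:
--             return middle - 3 * ((j + 1) // 2) if j % 2 == 1 else middle + 3 * (j // 2)
--         return middle + 3 * (j - k)
--
--     return [at_index(j) for j in range(1 + 2 * k + t)]
-- ===== Notes on version B (the rewrite author's own statement) =====
-- stated objective: alternative
-- what changed: Replaces A's append-two-per-iteration loop plus trailing range scan with a closed-form construction: compute the output length, then generate every position j directly from an index-to-value formula.
import Mathlib
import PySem

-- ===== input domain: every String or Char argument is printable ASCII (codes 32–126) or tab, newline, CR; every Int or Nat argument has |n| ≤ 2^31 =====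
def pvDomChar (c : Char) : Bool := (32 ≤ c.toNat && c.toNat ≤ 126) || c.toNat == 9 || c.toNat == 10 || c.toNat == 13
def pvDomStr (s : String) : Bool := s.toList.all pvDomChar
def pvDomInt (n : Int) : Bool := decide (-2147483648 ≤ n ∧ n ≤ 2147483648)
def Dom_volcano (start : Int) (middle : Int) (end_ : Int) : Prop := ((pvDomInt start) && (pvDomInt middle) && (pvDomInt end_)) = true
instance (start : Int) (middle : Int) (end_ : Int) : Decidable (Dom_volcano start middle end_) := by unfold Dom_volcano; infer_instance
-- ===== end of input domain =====

-- B builds the list by a closed-form index-to-value formula over a computed length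
-- instead of A's append-pairs loop plus a trailing range scan (objective: alternative).


-- ===== PORT A =====
def volcano (start : Int) (middle : Int) (end_ : Int) : List Int :=
  let volcano_list : List Int := [middle]
  let the_range : Int := PySem.Int.floordiv (min (end_ - middle) (middle - start)) 3
  let volcano_list :=
    (PySem.List.pyRange 1 (the_range + 1) 1).foldl
      (fun acc i => (acc ++ [middle - i * 3]) ++ [middle + i * 3]) volcano_list
  -- volcano_list[-1]: the list always contains middle, so the default is never used
  volcano_list ++ PySem.List.pyRange (PySem.List.pyGetD volcano_list (-1) 0 + 3) (end_ + 1) 3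

-- ===== PORT B =====
def volcano_alt (start : Int) (middle : Int) (end_ : Int) : List Int :=
  let k : Int := max 0 (PySem.Int.floordiv (min (end_ - middle) (middle - start)) 3)
  let t : Int := max 0 (PySem.Int.floordiv (end_ - middle - 3 * k) 3)
  let at_index : Int → Int := fun j =>
    if j = 0 then middle
    else if j ≤ 2 * k then
      if PySem.Int.mod j 2 = 1 then middle - 3 * (PySem.Int.floordiv (j + 1) 2)
      else middle + 3 * (PySem.Int.floordiv j 2)
    else middle + 3 * (j - k)
  (PySem.List.pyRange 0 (1 + 2 * k + t) 1).map at_index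

-- ===== PRECONDITION & SPEC =====
def Spec_volcano (start : Int) (middle : Int) (end_ : Int) (out : List Int) : Prop := out = volcano_alt start middle end_
instance (start : Int) (middle : Int) (end_ : Int) (out : List Int) : Decidable (Spec_volcano start middle end_ out) := by unfold Spec_volcano; infer_instance

-- ===== CLAIM =====
def Claim_equal_volcano : Prop := ∀ (start : Int) (middle : Int) (end_ : Int), Dom_volcano start middle end_ → Spec_volcano start middle end_ (volcano start middle end_)

-- ===== LEMMAS AND PROOFS =====

-- fold that appends two elements per step = flatMap of pairs
theorem foldl_append_pair {α β : Type} (f g : α → β) (l : List α) (acc : List β) :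
    l.foldl (fun acc x => (acc ++ [f x]) ++ [g x]) acc = acc ++ l.flatMap (fun x => [f x, g x]) := by
  induction l generalizing acc with
  | nil => simp
  | cons x xs ih => simp [List.flatMap]

-- a map over range(2k) = flatMap of index pairs over range(k)
theorem map_range_two {α : Type} (g : ℕ → α) (k : ℕ) :
    (List.range (2 * k)).map g = (List.range k).flatMap (fun x => [g (2 * x), g (2 * x + 1)]) := by
  induction k with
  | zero => simp
  | succ n ih =>
    have h : 2 * (n + 1) = (2 * n + 1) + 1 := by ring
    rw [h, List.range_succ, List.range_succ, List.range_succ, List.flatMap_append]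
    simp [ih]


-- splitting a map over range(1+2K+T) into head, index pairs, and tail
theorem range_split_pairs {α : Type} (g : ℕ → α) (K T : ℕ) :
    (List.range (1 + (2 * K + T))).map g
      = [g 0] ++ (List.range K).flatMap (fun x => [g (1 + 2 * x), g (1 + (2 * x + 1))])
          ++ (List.range T).map (fun i => g (1 + (2 * K + i))) := by
  rw [List.range_add, List.range_add]
  simp only [List.map_append, List.map_map, List.range_one, List.map_cons, List.map_nil,
    Function.comp_def]
  rw [map_range_two (fun n => g (1 + n)) K]
  simp

theorem flatMap_congr_range {α : Type} (F G : ℕ → List α) (k : ℕ)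
    (h : ∀ x < k, F x = G x) :
    (List.range k).flatMap F = (List.range k).flatMap G := by
  rw [List.flatMap, List.flatMap, List.map_congr_left]
  intro x hx
  exact h x (List.mem_range.mp hx)

theorem pyRange_three (a b : Int) :
    PySem.List.pyRange a b 3
      = (List.range (if a < b then ((b - a + 3 - 1) / 3).toNat else 0)).map (fun k : Nat => a + 3 * (k : Int)) := by
  rw [PySem.List.pyRange_of_pos a b (by norm_num)]

-- last element of [middle] ++ the pair block
theorem last_pair_block (middle : Int) (K : ℕ) :
    PySem.List.pyGetD
      ([middle] ++ (List.range K).flatMap (fun x : ℕ => [middle - 3 * ((x : Int) + 1), middle + 3 * ((x : Int) + 1)])) (-1) 0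
      = middle + 3 * (K : Int) := by
  cases K with
  | zero => simp [pysem]
  | succ j =>
    have hsplit : [middle] ++ (List.range (j + 1)).flatMap
          (fun x : ℕ => [middle - 3 * ((x : Int) + 1), middle + 3 * ((x : Int) + 1)])
        = ([middle] ++ (List.range j).flatMap
            (fun x : ℕ => [middle - 3 * ((x : Int) + 1), middle + 3 * ((x : Int) + 1)])
            ++ [middle - 3 * ((j : Int) + 1)]) ++ [middle + 3 * ((j : Int) + 1)] := by
      rw [List.range_succ, List.flatMap_append]
      simp
    rw [hsplit, PySem.List.pyGetD_neg_one_append_singleton]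
    push_cast
    ring

theorem volcano_eq (start middle end_ : Int) :
    volcano start middle end_ = volcano_alt start middle end_ := by
  unfold volcano volcano_alt
  dsimp only
  set r : Int := PySem.Int.floordiv (min (end_ - middle) (middle - start)) 3 with hrdef
  have hr : r * 3 ≤ min (end_ - middle) (middle - start) ∧
      min (end_ - middle) (middle - start) < (r + 1) * 3 :=
    (PySem.Int.floordiv_eq_iff_of_pos (by norm_num)).mp hrdef.symm
  set q : Int := PySem.Int.floordiv (end_ - middle - 3 * max 0 r) 3 with hqdef
  have hq : q * 3 ≤ end_ - middle - 3 * max 0 r ∧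
      end_ - middle - 3 * max 0 r < (q + 1) * 3 :=
    (PySem.Int.floordiv_eq_iff_of_pos (by norm_num)).mp hqdef.symm
  -- ===== A side =====
  rw [PySem.List.pyRange_one, foldl_append_pair, List.flatMap_map]
  have hbodyA : (fun x : ℕ => [middle - (1 + (x : Int)) * 3, middle + (1 + (x : Int)) * 3])
      = (fun x : ℕ => [middle - 3 * ((x : Int) + 1), middle + 3 * ((x : Int) + 1)]) := by
    funext x
    simp only [List.cons.injEq, and_true]
    exact ⟨by ring, by ring⟩
  have hKcast : ((r + 1 - 1).toNat : Int) = max 0 r := by omega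
  set K : ℕ := (r + 1 - 1).toNat with hKdef
  rw [hbodyA, last_pair_block middle K, hKcast, pyRange_three]
  -- ===== B side =====
  rw [PySem.List.pyRange_one]
  have hLnat : (1 + 2 * max 0 r + max 0 q - 0).toNat = 1 + (2 * K + (max 0 q).toNat) := by omega
  rw [hLnat]
  set T : ℕ := (max 0 q).toNat with hTdef
  rw [List.map_map]
  set g : ℕ → Int := (fun j : Int =>
      if j = 0 then middle
      else if j ≤ 2 * max 0 r then
        if PySem.Int.mod j 2 = 1 then middle - 3 * PySem.Int.floordiv (j + 1) 2
        else middle + 3 * PySem.Int.floordiv j 2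
      else middle + 3 * (j - max 0 r)) ∘ (fun k : ℕ => (0 : Int) + (k : Int)) with hgdef
  rw [range_split_pairs g K T]
  have hhead : g 0 = middle := by
    simp [hgdef]
  have hpairs : (List.range K).flatMap (fun x : ℕ => [g (1 + 2 * x), g (1 + (2 * x + 1))])
      = (List.range K).flatMap (fun x : ℕ => [middle - 3 * ((x : Int) + 1), middle + 3 * ((x : Int) + 1)]) := by
    apply flatMap_congr_range
    intro x hx
    have hxK : ((x : Int)) < max 0 r := by omega
    simp only [hgdef, Function.comp]
    rw [if_neg (by omega), if_pos (by push_cast; omega)]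
    rw [show PySem.Int.mod ((0 : Int) + ((1 + 2 * x : ℕ) : Int)) 2 = 1 by
      rw [PySem.Int.mod_eq_emod_of_pos (by norm_num)]; omega]
    rw [if_pos rfl]
    rw [show PySem.Int.floordiv ((0 : Int) + ((1 + 2 * x : ℕ) : Int) + 1) 2 = (x : Int) + 1 by
      rw [PySem.Int.floordiv_eq_ediv_of_pos (by norm_num)]; omega]
    rw [if_neg (by omega), if_pos (by push_cast; omega)]
    rw [show PySem.Int.mod ((0 : Int) + ((1 + (2 * x + 1) : ℕ) : Int)) 2 = 0 by
      rw [PySem.Int.mod_eq_emod_of_pos (by norm_num)]; omega]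
    rw [if_neg (by norm_num)]
    rw [show PySem.Int.floordiv ((0 : Int) + ((1 + (2 * x + 1) : ℕ) : Int)) 2 = (x : Int) + 1 by
      rw [PySem.Int.floordiv_eq_ediv_of_pos (by norm_num)]; omega]
  have htail : (List.range T).map (fun i : ℕ => g (1 + (2 * K + i)))
      = (List.range T).map (fun i : ℕ => middle + 3 * (K : Int) + 3 + 3 * (i : Int)) := by
    apply List.map_congr_left
    intro i _
    simp only [hgdef, Function.comp]
    rw [if_neg (by omega), if_neg (by push_cast; omega)]
    push_cast
    omega
  rw [hhead, hpairs, htail]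
  -- tail count of A equals T
  have hcnt : (if middle + 3 * (max 0 r) + 3 < end_ + 1 then
        ((end_ + 1 - (middle + 3 * (max 0 r) + 3) + 3 - 1) / 3).toNat else 0) = T := by
    split_ifs <;> omega
  rw [hcnt]
  have hbase : (fun k : Nat => middle + 3 * (max 0 r) + 3 + 3 * (k : Int))
      = (fun i : ℕ => middle + 3 * (K : Int) + 3 + 3 * (i : Int)) := by
    funext i
    rw [hKcast]
  rw [hbase, List.append_assoc]

-- ===== VERDICT =====
theorem volcano_spec : Claim_equal_volcano := by
  intro s m e _
  unfold Spec_volcano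
  exact volcano_eq s m e
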